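-- pv_equiv track=rewrite | github.com/sakir-uncc/ITCS5010_Project_UNCC_ImageGeneration | SD3_finetune/train.py | _extract_location_ids
-- ===== SOURCE A (Python) =====
-- from typing import Dict, Any, List, Tuple, Union
--
-- def _extract_location_ids(
--     captions: List[str],
--     token_to_id: Dict[str, int],
--     default_id: int = 0,
-- ) -> List[int]:
--     """
--     Determine a location ID per caption by scanning for known location tokens.
--     Simple heuristic: first token that appears in the caption wins.
--     """
--     loc_ids: List[int] = []
--     tokens = list(token_to_id.items())
--
--     for text in captions:
--         if text is None:
--             text = ""
--         text = str(text)
--         found = False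
--         for token, idx in tokens:
--             if token in text:
--                 loc_ids.append(idx)
--                 found = True
--                 break
--         if not found:
--             loc_ids.append(default_id)
--     return loc_ids
-- ===== SOURCE B (Python) =====
-- def _extract_location_ids(captions, token_to_id, default_id=0):
--     # Memoised: each distinct caption is scanned once; the per-caption id is
--     # computed by a back-to-front overwrite over the tokens (last write = first
--     # token in dict order that occurs), no break/found flag needed.
--     tokens = list(token_to_id.items())
--     texts = ["" if t is None else str(t) for t in captions]
--     cache = {}
--     out = []
--     for text in texts:
--         if text in cache:
--             out.append(cache[text])
--         else:
--             loc = default_id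
--             for token, idx in reversed(tokens):
--                 if token in text:
--                     loc = idx
--             cache[text] = loc
--             out.append(loc)
--     return out
-- ===== Notes on version B (the rewrite author's own statement) =====
-- stated objective: alternative
-- what changed: B memoises per distinct caption text in a dict so each distinct caption is scanned against the tokens only once, and replaces A's found-flag/break inner loop by a branch-free overwrite fold over the tokens in reverse order (the last write is the first matching token).
import Mathlib
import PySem

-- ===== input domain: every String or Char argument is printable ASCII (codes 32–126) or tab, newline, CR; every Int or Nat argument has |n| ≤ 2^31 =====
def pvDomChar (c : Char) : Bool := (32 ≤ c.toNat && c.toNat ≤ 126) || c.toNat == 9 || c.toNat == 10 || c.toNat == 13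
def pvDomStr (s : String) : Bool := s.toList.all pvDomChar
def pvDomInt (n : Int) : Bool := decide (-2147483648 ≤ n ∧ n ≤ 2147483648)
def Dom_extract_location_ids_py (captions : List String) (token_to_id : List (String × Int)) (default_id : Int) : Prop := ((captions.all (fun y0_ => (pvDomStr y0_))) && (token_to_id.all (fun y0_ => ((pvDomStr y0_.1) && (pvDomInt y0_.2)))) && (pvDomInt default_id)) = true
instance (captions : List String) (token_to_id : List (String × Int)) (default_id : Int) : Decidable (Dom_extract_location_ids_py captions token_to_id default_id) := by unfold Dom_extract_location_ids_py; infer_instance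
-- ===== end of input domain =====

-- B memoises per distinct caption and replaces A's found/break inner scan with a reversed overwrite fold (alternative structure, same cost class; timing showed no ≥1.5× speed-up).


-- ===== PORT A =====
-- inner loop of A: first (token, idx) with token in text wins (found/break)
def pvLoopA (text : String) : List (String × Int) → Option Int
  | [] => none
  | (token, idx) :: rest =>
    if PySem.Str.isIn token text then some idx else pvLoopA text rest

def extract_location_ids_py (captions : List String) (token_to_id : List (String × Int)) (default_id : Int) : List Int :=
  -- tokens = list(token_to_id.items())
  let tokens := (PySem.Dict.ofList token_to_id).items
  -- captions are Strings here, so the `text is None` / `str(text)` normalisation is the identity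
  captions.foldl (fun loc_ids text =>
    match pvLoopA text tokens with
    | some idx => loc_ids ++ [idx]          -- loc_ids.append(idx); found = True; break
    | none => loc_ids ++ [default_id]) []   -- if not found: loc_ids.append(default_id)

-- ===== PORT B =====
-- B's inner computation: overwrite fold over reversed(tokens), no break
def pvLoopB (text : String) (tokens : List (String × Int)) (default_id : Int) : Int :=
  tokens.reverse.foldl (fun loc p => if PySem.Str.isIn p.1 text then p.2 else loc) default_id

def extract_location_ids_py_alt (captions : List String) (token_to_id : List (String × Int)) (default_id : Int) : List Int :=
  let tokens := (PySem.Dict.ofList token_to_id).items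
  -- texts = captions (the None/str normalisation is the identity on Strings)
  (captions.foldl (fun st text =>
    if st.1.contains text then
      -- out.append(cache[text]); the key is present by the branch guard, so KeyError is impossible
      (st.1, st.2 ++ [st.1.getD text default_id])
    else
      (st.1.insert text (pvLoopB text tokens default_id),
       st.2 ++ [pvLoopB text tokens default_id]))
    ((PySem.Dict.empty : PySem.Dict String Int), ([] : List Int))).2

-- ===== PRECONDITION & SPEC =====
def Spec_extract_location_ids_py (captions : List String) (token_to_id : List (String × Int)) (default_id : Int) (out : List Int) : Prop := out = extract_location_ids_py_alt captions token_to_id default_id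
instance (captions : List String) (token_to_id : List (String × Int)) (default_id : Int) (out : List Int) : Decidable (Spec_extract_location_ids_py captions token_to_id default_id out) := by unfold Spec_extract_location_ids_py; infer_instance

-- ===== CLAIM (what is proved, stated in full; the proofs are below) =====
def Claim_equal_extract_location_ids_py : Prop := ∀ (captions : List String) (token_to_id : List (String × Int)) (default_id : Int), Dom_extract_location_ids_py captions token_to_id default_id → Spec_extract_location_ids_py captions token_to_id default_id (extract_location_ids_py captions token_to_id default_id)

-- ===== LEMMAS AND PROOFS =====
-- per-text value both programs compute
def pvF (tokens : List (String × Int)) (default_id : Int) (text : String) : Int :=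
  match pvLoopA text tokens with
  | some idx => idx
  | none => default_id

-- B's reversed overwrite fold equals A's first-match scan
theorem pvLoopB_eq (text : String) (tokens : List (String × Int)) (d : Int) :
    pvLoopB text tokens d = pvF tokens d text := by
  unfold pvLoopB pvF
  rw [List.foldl_reverse]
  induction tokens with
  | nil => rfl
  | cons p rest ih =>
    by_cases h : PySem.Chars.isIn p.1.toList text.toList = true
    · simp [pvLoopA, PySem.Str.isIn, h]
    · simp only [PySem.Str.isIn] at ih
      simp [pvLoopA, PySem.Str.isIn, h, ih]

theorem portA_eq_map (tokens : List (String × Int)) (d : Int) :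
    ∀ (captions : List String) (acc : List Int),
      captions.foldl (fun loc_ids text =>
        match pvLoopA text tokens with
        | some idx => loc_ids ++ [idx]
        | none => loc_ids ++ [d]) acc = acc ++ captions.map (pvF tokens d) := by
  intro captions
  induction captions with
  | nil => intro acc; simp
  | cons c cs ih =>
    intro acc
    simp only [List.foldl_cons, List.map_cons, ih]
    unfold pvF
    cases pvLoopA c tokens <;> simp

theorem portB_eq_map (tokens : List (String × Int)) (d : Int) :
    ∀ (captions : List String) (cache : PySem.Dict String Int) (acc : List Int),
      (∀ k v, cache.get? k = some v → v = pvF tokens d k) →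
      (captions.foldl (fun st text =>
        if st.1.contains text then
          (st.1, st.2 ++ [st.1.getD text d])
        else
          (st.1.insert text (pvLoopB text tokens d),
           st.2 ++ [pvLoopB text tokens d])) (cache, acc)).2
        = acc ++ captions.map (pvF tokens d) := by
  intro captions
  induction captions with
  | nil => intro cache acc _; simp
  | cons c cs ih =>
    intro cache acc hinv
    simp only [List.foldl_cons, List.map_cons]
    by_cases h : cache.contains c = true
    · rw [if_pos h]
      have hs : (cache.get? c).isSome := by
        rw [← PySem.Dict.contains_eq_isSome_get?]; exact h
      obtain ⟨v, hv⟩ := Option.isSome_iff_exists.mp hs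
      have : cache.getD c d = v := PySem.Dict.getD_of_get?_eq_some cache d hv
      rw [ih cache _ hinv, this, hinv c v hv]
      simp
    · rw [if_neg h]
      rw [ih _ _ (by
        intro k v hkv
        rw [PySem.Dict.get?_insert] at hkv
        by_cases hk : k = c
        · subst hk; simp at hkv; rw [← hkv, pvLoopB_eq]
        · rw [if_neg hk] at hkv; exact hinv k v hkv)]
      rw [pvLoopB_eq]
      simp

-- ===== VERDICT (by name: the statement is the Claim_ definition above) =====
theorem extract_location_ids_py_spec : Claim_equal_extract_location_ids_py := by
  intro captions token_to_id default_id _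
  unfold Spec_extract_location_ids_py extract_location_ids_py extract_location_ids_py_alt
  rw [portA_eq_map, portB_eq_map]
  intro k v hkv
  simp [PySem.Dict.get?_empty] at hkv
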